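-- pv_equiv track=rewrite | github.com/wesley511/ioi-colony | worker_decision_v2.py | extract_canonical_terminal_sections
-- ===== SOURCE A (Python) =====
-- from typing import Any, Dict, List, Tuple
--
-- def extract_canonical_terminal_sections(lines: List[str]) -> Tuple[List[str], Dict[str, List[str]]]:
--     body: List[str] = []
--     terminal_sections: Dict[str, List[str]] = {}
--     idx = 0
--     while idx < len(lines):
--         stripped = lines[idx].strip()
--         if stripped.startswith("- rationale:"):
--             terminal_sections["rationale"] = [lines[idx].rstrip()]
--             idx += 1
--             continue
--         if stripped == "- last_reinforced:":
--             section_lines = [lines[idx].rstrip()]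
--             idx += 1
--             while idx < len(lines) and lines[idx].startswith("  - "):
--                 section_lines.append(lines[idx].rstrip())
--                 idx += 1
--             terminal_sections["last_reinforced"] = section_lines
--             continue
--         if stripped.startswith("- status:"):
--             terminal_sections["status"] = [lines[idx].rstrip()]
--             idx += 1
--             continue
--         if stripped.startswith("- review_status:"):
--             terminal_sections["review_status"] = [lines[idx].rstrip()]
--             idx += 1
--             continue
--         if stripped.startswith("- last_updated:"):
--             terminal_sections["last_updated"] = [lines[idx].rstrip()]
--             idx += 1
--             continue
--         body.append(lines[idx].rstrip())
--         idx += 1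
--     return body, terminal_sections
-- ===== SOURCE B (Python) =====
-- from typing import Dict, List, Tuple
--
-- def extract_canonical_terminal_sections(lines: List[str]) -> Tuple[List[str], Dict[str, List[str]]]:
--     body: List[str] = []
--     terminal_sections: Dict[str, List[str]] = {}
--     collecting = False  # inside a "- last_reinforced:" continuation block?
--     for line in lines:
--         if collecting and line.startswith("  - "):
--             terminal_sections["last_reinforced"].append(line.rstrip())
--             continue
--         collecting = False
--         stripped = line.strip()
--         trimmed = line.rstrip()
--         if stripped.startswith("- rationale:"):
--             terminal_sections["rationale"] = [trimmed]
--         elif stripped == "- last_reinforced:":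
--             terminal_sections["last_reinforced"] = [trimmed]
--             collecting = True
--         elif stripped.startswith("- status:"):
--             terminal_sections["status"] = [trimmed]
--         elif stripped.startswith("- review_status:"):
--             terminal_sections["review_status"] = [trimmed]
--         elif stripped.startswith("- last_updated:"):
--             terminal_sections["last_updated"] = [trimmed]
--         else:
--             body.append(trimmed)
--     return body, terminal_sections
-- ===== Notes on version B (the rewrite author's own statement) =====
-- stated objective: alternative
-- what changed: Replaced A's index-advancing while loop with a nested inner while for continuation lines by a single flat pass over the lines that threads a 'collecting' flag across iterations and appends continuation lines to the section already stored in the dict.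
import Mathlib
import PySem

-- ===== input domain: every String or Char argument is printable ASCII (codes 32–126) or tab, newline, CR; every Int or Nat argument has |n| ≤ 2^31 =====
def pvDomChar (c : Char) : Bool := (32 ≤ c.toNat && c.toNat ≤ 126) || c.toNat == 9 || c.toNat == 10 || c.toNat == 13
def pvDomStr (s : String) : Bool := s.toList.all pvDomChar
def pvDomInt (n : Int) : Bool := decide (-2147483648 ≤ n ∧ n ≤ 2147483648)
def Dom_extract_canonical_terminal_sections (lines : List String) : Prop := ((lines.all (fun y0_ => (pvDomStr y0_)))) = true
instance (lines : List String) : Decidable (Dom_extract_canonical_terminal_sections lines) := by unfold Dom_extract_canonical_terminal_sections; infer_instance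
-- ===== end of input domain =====

-- B rewrites A's index-advancing loop with a nested inner while as one flat state-machine
-- pass threading a 'collecting' flag (objective: alternative decomposition, same cost).

-- ===== PORT A =====
-- inner 'while idx < len(lines) and lines[idx].startswith("  - ")' of A:
-- consumes continuation lines, returns (section_lines, remaining lines)
def pvAInner (rest : List String) (acc : List String) : List String × List String :=
  match rest with
  | [] => (acc, [])
  | l :: rest' =>
    if PySem.Str.startswith l "  - " then pvAInner rest' (acc ++ [PySem.Str.rstrip l])
    else (acc, l :: rest')

theorem pvAInner_length (rest acc : List String) : (pvAInner rest acc).2.length ≤ rest.length := by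
  induction rest generalizing acc with
  | nil => simp [pvAInner]
  | cons l rest' ih =>
    simp only [pvAInner]
    split
    · exact Nat.le_trans (ih _) (Nat.le_succ _)
    · exact Nat.le_refl _

def pvALoop (rest : List String) (body : List String)
    (d : PySem.Dict String (List String)) : List String × PySem.Dict String (List String) :=
  match rest with
  | [] => (body, d)
  | l :: rest' =>
    let stripped := PySem.Str.strip l
    if PySem.Str.startswith stripped "- rationale:" then
      pvALoop rest' body (d.insert "rationale" [PySem.Str.rstrip l])
    else if stripped = "- last_reinforced:" then
      let p := pvAInner rest' [PySem.Str.rstrip l]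
      pvALoop p.2 body (d.insert "last_reinforced" p.1)
    else if PySem.Str.startswith stripped "- status:" then
      pvALoop rest' body (d.insert "status" [PySem.Str.rstrip l])
    else if PySem.Str.startswith stripped "- review_status:" then
      pvALoop rest' body (d.insert "review_status" [PySem.Str.rstrip l])
    else if PySem.Str.startswith stripped "- last_updated:" then
      pvALoop rest' body (d.insert "last_updated" [PySem.Str.rstrip l])
    else
      pvALoop rest' (body ++ [PySem.Str.rstrip l]) d
termination_by rest.length
decreasing_by all_goals first
  | exact Nat.lt_succ_of_le (pvAInner_length _ _)
  | (simp only [List.length_cons]; omega)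

def extract_canonical_terminal_sections (lines : List String) :
    List String × (List (String × List String)) :=
  let p := pvALoop lines [] PySem.Dict.empty
  (p.1, p.2.items)

-- ===== PORT B =====
def pvBLoop (rest : List String) (collecting : Bool) (body : List String)
    (d : PySem.Dict String (List String)) : List String × PySem.Dict String (List String) :=
  match rest with
  | [] => (body, d)
  | l :: rest' =>
    if collecting && PySem.Str.startswith l "  - " then
      -- terminal_sections["last_reinforced"].append(...); key is present whenever collecting
      pvBLoop rest' collecting body
        (d.modify "last_reinforced" [] (· ++ [PySem.Str.rstrip l]))
    else
      let stripped := PySem.Str.strip l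
      let trimmed := PySem.Str.rstrip l
      if PySem.Str.startswith stripped "- rationale:" then
        pvBLoop rest' false body (d.insert "rationale" [trimmed])
      else if stripped = "- last_reinforced:" then
        pvBLoop rest' true body (d.insert "last_reinforced" [trimmed])
      else if PySem.Str.startswith stripped "- status:" then
        pvBLoop rest' false body (d.insert "status" [trimmed])
      else if PySem.Str.startswith stripped "- review_status:" then
        pvBLoop rest' false body (d.insert "review_status" [trimmed])
      else if PySem.Str.startswith stripped "- last_updated:" then
        pvBLoop rest' false body (d.insert "last_updated" [trimmed])
      else
        pvBLoop rest' false (body ++ [trimmed]) d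

def extract_canonical_terminal_sections_alt (lines : List String) :
    List String × (List (String × List String)) :=
  let p := pvBLoop lines false [] PySem.Dict.empty
  (p.1, p.2.items)

-- ===== PRECONDITION & SPEC =====
def Spec_extract_canonical_terminal_sections (lines : List String) (out : List String × (List (String × List String))) : Prop := out = extract_canonical_terminal_sections_alt lines
instance (lines : List String) (out : List String × (List (String × List String))) : Decidable (Spec_extract_canonical_terminal_sections lines out) := by unfold Spec_extract_canonical_terminal_sections; infer_instance

-- ===== CLAIM (what is proved, stated in full; the proofs are below) =====
def Claim_equal_extract_canonical_terminal_sections : Prop := ∀ (lines : List String), Dom_extract_canonical_terminal_sections lines → Spec_extract_canonical_terminal_sections lines (extract_canonical_terminal_sections lines)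

-- ===== LEMMAS AND PROOFS =====
theorem pv_modify_insert_self (d : PySem.Dict String (List String)) (k : String)
    (v : List String) (f : List String → List String) :
    (d.insert k v).modify k [] f = d.insert k (f v) := by
  unfold PySem.Dict.modify
  rw [PySem.Dict.getD_insert_self, PySem.Dict.insert_insert_self]

theorem pvBLoop_flag (l : String) (rest body : List String) (d : PySem.Dict String (List String))
    (h : PySem.Str.startswith l "  - " = false) :
    pvBLoop (l :: rest) true body d = pvBLoop (l :: rest) false body d := by
  simp only [pvBLoop, h, Bool.and_false]
  simp

theorem pv_main : ∀ (n : ℕ) (rest : List String), rest.length ≤ n →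
    (∀ body d, pvBLoop rest false body d = pvALoop rest body d) ∧
    (∀ (acc body : List String) (d : PySem.Dict String (List String)),
      pvBLoop rest true body (d.insert "last_reinforced" acc) =
        pvALoop (pvAInner rest acc).2 body
          (d.insert "last_reinforced" (pvAInner rest acc).1)) := by
  intro n
  induction n with
  | zero =>
    intro rest h
    have : rest = [] := List.eq_nil_of_length_eq_zero (Nat.le_zero.mp h)
    subst this
    exact ⟨fun body d => by simp [pvBLoop, pvALoop],
           fun acc body d => by simp [pvBLoop, pvALoop, pvAInner]⟩
  | succ n ih =>
    intro rest hlen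
    match rest with
    | [] =>
      exact ⟨fun body d => by simp [pvBLoop, pvALoop],
             fun acc body d => by simp [pvBLoop, pvALoop, pvAInner]⟩
    | l :: rest' =>
      have hlen' : rest'.length ≤ n := by simpa using Nat.lt_succ_iff.mp (by simpa using hlen)
      have part1 : ∀ body d, pvBLoop (l :: rest') false body d = pvALoop (l :: rest') body d := by
        intro body d
        simp only [pvBLoop, pvALoop, Bool.false_and]
        split_ifs with h0 h1 h2 h3 h4 h5 <;>
          first
          | exact (ih rest' hlen').1 _ _
          | exact (ih rest' hlen').2 _ _ _
          | simp_all
      refine ⟨part1, ?_⟩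
      intro acc body d
      by_cases hc : PySem.Str.startswith l "  - " = true
      · have step : pvBLoop (l :: rest') true body (d.insert "last_reinforced" acc) =
            pvBLoop rest' true body (d.insert "last_reinforced" (acc ++ [PySem.Str.rstrip l])) := by
          simp only [pvBLoop, hc, Bool.and_true, if_true, pv_modify_insert_self]
        have hA : pvAInner (l :: rest') acc = pvAInner rest' (acc ++ [PySem.Str.rstrip l]) := by
          simp only [pvAInner]
          rw [if_pos hc]
        rw [step, hA]
        exact (ih rest' hlen').2 _ _ _
      · have hc' : PySem.Str.startswith l "  - " = false := by simpa using hc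
        rw [pvBLoop_flag l rest' body _ hc', part1]
        have hA : pvAInner (l :: rest') acc = (acc, l :: rest') := by
          simp only [pvAInner]
          rw [if_neg (by rw [hc']; exact Bool.false_ne_true)]
        rw [hA]

theorem extract_canonical_terminal_sections_spec' (lines : List String) :
    extract_canonical_terminal_sections lines = extract_canonical_terminal_sections_alt lines := by
  unfold extract_canonical_terminal_sections extract_canonical_terminal_sections_alt
  rw [(pv_main lines.length lines (Nat.le_refl _)).1]

-- ===== VERDICT (by name: the statement is the Claim_ definition above) =====
theorem extract_canonical_terminal_sections_spec : Claim_equal_extract_canonical_terminal_sections := by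
  intro lines _
  unfold Spec_extract_canonical_terminal_sections
  exact extract_canonical_terminal_sections_spec' lines
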